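-- pv_equiv track=rewrite | github.com/pythoneda-shared-pythonlang/infrastructure | pythoneda/infrastructure/dbus/dbus_signal_listener.py | parse_signal_name
-- ===== SOURCE A (Python) =====
-- from typing import Dict, List
--
-- def parse_signal_name(value) -> List:
--     """
--     Parses a signal name into tokens.
--     :param value: The value.
--     :type value: str
--     :return: The tokens.
--     :rtype: List
--     """
--     result = []
--     tokens = value.split("_")
--     current_token = None
--     for token in tokens:
--         if token[0].isupper():
--             if current_token is not None:
--                 result.append("_".join(current_token))
--             result.append(token)
--             current_token = None
--         else:
--             if current_token is None:
--                 current_token = []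
--             current_token.append(token)
--
--     if current_token is not None:
--         result.append("_".join(current_token))
--
--     result[:-1] = [x.lower() for x in result[:-1]]
--
--     return result
-- ===== SOURCE B (Python) =====
-- def _groups(tokens):
--     """Maximal-run segmentation: uppercase-initial tokens stand alone,
--     each maximal run of lowercase-initial tokens is rejoined with '_'."""
--     if not tokens:
--         return []
--     if tokens[0][0].isupper():
--         return [tokens[0]] + _groups(tokens[1:])
--     i = 1
--     while i < len(tokens) and not tokens[i][0].isupper():
--         i += 1
--     return ["_".join(tokens[:i])] + _groups(tokens[i:])
--
--
-- def parse_signal_name(value):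
--     result = _groups(value.split("_"))
--     return [x.lower() for x in result[:-1]] + result[-1:]
-- ===== Notes on version B (the rewrite author's own statement) =====
-- stated objective: alternative
-- what changed: Replaces A's flush-on-uppercase accumulator state machine with a recursive maximal-run segmentation of the token list (uppercase-initial tokens emitted alone, each maximal run of lowercase-initial tokens scanned and rejoined at once), with the final lowering expressed as a list build instead of slice assignment.
import Mathlib
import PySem

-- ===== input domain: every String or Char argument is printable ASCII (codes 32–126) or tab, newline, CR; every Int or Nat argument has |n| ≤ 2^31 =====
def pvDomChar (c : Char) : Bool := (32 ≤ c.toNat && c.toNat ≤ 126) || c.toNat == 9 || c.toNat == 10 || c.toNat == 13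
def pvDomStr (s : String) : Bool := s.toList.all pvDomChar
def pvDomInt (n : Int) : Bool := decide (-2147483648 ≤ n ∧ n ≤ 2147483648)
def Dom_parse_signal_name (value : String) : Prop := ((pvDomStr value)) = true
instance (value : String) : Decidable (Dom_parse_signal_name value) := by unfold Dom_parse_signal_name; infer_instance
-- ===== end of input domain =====

-- B replaces A's flush-on-uppercase accumulator state machine by a recursive maximal-run
-- segmentation of the token list (objective: alternative decomposition, same cost).

-- token[0].isupper(): Python indexes the string (IndexError on "", excluded by Pre_) and
-- asks isupper of the single char; exact on the ASCII domain via PySem.Chars.isupper.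
def pvKey (t : String) : Bool :=
  match PySem.Str.pyGet? t 0 with
  | some c => PySem.Chars.isupper c
  | none => false

-- ===== PORT A =====
-- one step of A's for-loop over tokens; state = (result, current_token)
def pvStepA (s : List String × Option (List String)) (token : String) :
    List String × Option (List String) :=
  if pvKey token then
    match s.2 with
    | some c => (s.1 ++ [PySem.Str.join "_" c, token], none)
    | none => (s.1 ++ [token], none)
  else
    (s.1, some ((s.2.getD []) ++ [token]))

def parse_signal_name (value : String) : List String :=
  let tokens := (PySem.Str.split? value "_").getD []   -- sep "_" ≠ "", so split? is some
  let st := tokens.foldl pvStepA ([], none)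
  let result :=
    match st.2 with
    | some c => st.1 ++ [PySem.Str.join "_" c]
    | none => st.1
  -- result[:-1] = [x.lower() for x in result[:-1]]
  result.dropLast.map PySem.Str.lower ++ result.drop (result.length - 1)

-- ===== PORT B =====
-- _groups: uppercase-initial token stands alone; else scan the maximal run of
-- lowercase-initial tokens (the index scan = takeWhile/dropWhile) and rejoin it.
def pvGroupsB (tokens : List String) : List String :=
  match tokens with
  | [] => []
  | t :: ts =>
    if pvKey t then t :: pvGroupsB ts
    else
      PySem.Str.join "_" (t :: ts.takeWhile (fun u => !pvKey u)) ::
        pvGroupsB (ts.dropWhile (fun u => !pvKey u))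
termination_by tokens.length
decreasing_by
  · simp
  · have := List.length_dropWhile_le (fun u => !pvKey u) ts
    simp; omega

def parse_signal_name_alt (value : String) : List String :=
  let result := pvGroupsB ((PySem.Str.split? value "_").getD [])
  result.dropLast.map PySem.Str.lower ++ result.drop (result.length - 1)

-- ===== PRECONDITION & SPEC =====
-- Pre_ excludes exactly the inputs where Python A raises IndexError (token[0] on an
-- empty token, i.e. value empty, or with leading/trailing/double underscores).
def Pre_parse_signal_name (value : String) : Prop :=
  ∀ t ∈ (PySem.Str.split? value "_").getD [], t ≠ ""
instance (value : String) : Decidable (Pre_parse_signal_name value) := by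
  unfold Pre_parse_signal_name; infer_instance

def pvWitness_parse_signal_name : String := "new_Sample_event_received"

def Spec_parse_signal_name (value : String) (out : List String) : Prop := out = parse_signal_name_alt value
instance (value : String) (out : List String) : Decidable (Spec_parse_signal_name value out) := by unfold Spec_parse_signal_name; infer_instance

-- ===== CLAIM (what is proved, stated in full; the proofs are below) =====
def Claim_equal_parse_signal_name : Prop := ∀ (value : String), Dom_parse_signal_name value → Pre_parse_signal_name value → Spec_parse_signal_name value (parse_signal_name value)

-- ===== LEMMAS AND PROOFS =====

-- continuation view of A's loop: what remains to be emitted from state `cur`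
def pvG (cur : Option (List String)) (ts : List String) : List String :=
  match ts with
  | [] => match cur with | none => [] | some c => [PySem.Str.join "_" c]
  | t :: ts =>
    if pvKey t then
      (match cur with | none => [] | some c => [PySem.Str.join "_" c]) ++ t :: pvG none ts
    else
      pvG (some ((cur.getD []) ++ [t])) ts

def pvFlush (s : List String × Option (List String)) : List String :=
  match s.2 with
  | some c => s.1 ++ [PySem.Str.join "_" c]
  | none => s.1

lemma pvFoldA_eq_G (ts : List String) : ∀ (res : List String) (cur : Option (List String)),
    pvFlush (ts.foldl pvStepA (res, cur)) = res ++ pvG cur ts := by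
  induction ts with
  | nil => intro res cur; cases cur <;> simp [pvFlush, pvG]
  | cons t ts ih =>
    intro res cur
    simp only [List.foldl_cons, pvStepA, pvG]
    by_cases hk : pvKey t
    · cases cur <;> simp [hk, ih] 
    · cases cur <;> simp [hk, ih]

lemma pvG_some (ts : List String) : ∀ (c : List String),
    pvG (some c) ts =
      PySem.Str.join "_" (c ++ ts.takeWhile (fun u => !pvKey u)) ::
        pvG none (ts.dropWhile (fun u => !pvKey u)) := by
  induction ts with
  | nil => intro c; simp [pvG]
  | cons t ts ih =>
    intro c
    by_cases hk : pvKey t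
    · simp [pvG, hk, List.takeWhile, List.dropWhile]
    · simp only [pvG, hk, Option.getD_some, ih (c ++ [t]),
        List.takeWhile_cons, List.dropWhile_cons]
      simp

lemma pvG_none_eq_groupsB (ts : List String) : pvG none ts = pvGroupsB ts := by
  induction hn : ts.length using Nat.strong_induction_on generalizing ts with
  | _ n ih =>
    match ts with
    | [] => simp [pvG, pvGroupsB]
    | t :: ts =>
      by_cases hk : pvKey t
      · rw [pvGroupsB]
        simp only [pvG, hk, if_pos, List.nil_append]
        rw [ih ts.length (by simp [← hn]) ts rfl]
      · rw [pvGroupsB]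
        simp only [pvG, hk, Option.getD_none, List.nil_append,
          pvG_some ts [t], List.singleton_append]
        have hd := List.length_dropWhile_le (fun u => !pvKey u) ts
        rw [ih (ts.dropWhile (fun u => !pvKey u)).length (by simp [← hn]; omega) _ rfl]
        simp

-- ===== VERDICT (by name: the statement is the Claim_ definition above) =====
theorem parse_signal_name_spec : Claim_equal_parse_signal_name := by
  intro value _ _
  unfold Spec_parse_signal_name parse_signal_name parse_signal_name_alt
  have h := pvFoldA_eq_G ((PySem.Str.split? value "_").getD []) [] none
  simp only [pvG_none_eq_groupsB, List.nil_append] at h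
  simp only [← h, pvFlush]
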